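-- pv_equiv track=rewrite | github.com/decaf12/advent-of-code | 2025/9/b.py | check
-- ===== SOURCE A (Python) =====
-- from typing import List, Tuple
--
-- UP = 'UP'
--
-- LEFT = 'LEFT'
--
-- DOWN = 'DOWN'
--
-- RIGHT = 'RIGHT'
--
-- def check(coords: List[Tuple[int]], tour: List[Tuple[int]], sp: int, ep: int):
--     start_row, start_col = coords[sp]
--     end_row, end_col = coords[ep]
--
--     N, S = sorted((start_row, end_row))
--     W, E = sorted((start_col, end_col))
--
--     has_horizontal_top = False
--     has_horizontal_bottom = False
--     has_vertical_left = False
--     has_vertical_right = False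
--
--     for dir, *rest in tour:
--         if dir == UP:
--             from_row, to_row, col = rest
--             if col <= W:
--                 has_vertical_left = True
--             if col >= E:
--                 has_vertical_right = True
--             if from_row >= S and to_row < S:
--                 if col in range(W + 1, E):
--                     return False
--         elif dir == DOWN:
--             from_row, to_row, col = rest
--             if col <= W:
--                 has_vertical_left = True
--             if col >= E:
--                 has_vertical_right = True
--             if from_row <= N and to_row > N:
--                 if col in range(W + 1, E):
--                     return False
--         elif dir == LEFT:
--             from_col, to_col, row = rest
--             if row <= N:
--                 has_horizontal_top = True
--             if row >= S:
--                 has_horizontal_bottom = True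
--             if from_col >= E and to_col < E:
--                 if row in range(N + 1, S):
--                     return False
--         elif dir == RIGHT:
--             from_col, to_col, row = rest
--             if row <= N:
--                 has_horizontal_top = True
--             if row >= S:
--                 has_horizontal_bottom = True
--             if from_col <= W and to_col > W:
--                 if row in range(N + 1, S):
--                     return False
--     return has_horizontal_top and has_horizontal_bottom and has_vertical_left and has_vertical_right
-- ===== SOURCE B (Python) =====
-- def check(coords, tour, sp, ep):
--     start_row, start_col = coords[sp]
--     end_row, end_col = coords[ep]
--     N, S = sorted((start_row, end_row))
--     W, E = sorted((start_col, end_col))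
--
--     def crosses(edge):
--         d, a, b, c = edge
--         if d == 'UP':
--             return a >= S and b < S and W < c < E
--         if d == 'DOWN':
--             return a <= N and b > N and W < c < E
--         if d == 'LEFT':
--             return a >= E and b < E and N < c < S
--         if d == 'RIGHT':
--             return a <= W and b > W and N < c < S
--         return False
--
--     if any(crosses(e) for e in tour):
--         return False
--
--     top = any(d in ('LEFT', 'RIGHT') and c <= N for d, _, _, c in tour)
--     bottom = any(d in ('LEFT', 'RIGHT') and c >= S for d, _, _, c in tour)
--     left = any(d in ('UP', 'DOWN') and c <= W for d, _, _, c in tour)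
--     right = any(d in ('UP', 'DOWN') and c >= E for d, _, _, c in tour)
--     return top and bottom and left and right
-- ===== Notes on version B (the rewrite author's own statement) =====
-- stated objective: simpler
-- what changed: Replaces A's single fused stateful loop with early return by one declarative any() scan for interior crossings plus four independent any() scans for the side flags, exploiting that the early False matters only when the final answer is False anyway.
import Mathlib
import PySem

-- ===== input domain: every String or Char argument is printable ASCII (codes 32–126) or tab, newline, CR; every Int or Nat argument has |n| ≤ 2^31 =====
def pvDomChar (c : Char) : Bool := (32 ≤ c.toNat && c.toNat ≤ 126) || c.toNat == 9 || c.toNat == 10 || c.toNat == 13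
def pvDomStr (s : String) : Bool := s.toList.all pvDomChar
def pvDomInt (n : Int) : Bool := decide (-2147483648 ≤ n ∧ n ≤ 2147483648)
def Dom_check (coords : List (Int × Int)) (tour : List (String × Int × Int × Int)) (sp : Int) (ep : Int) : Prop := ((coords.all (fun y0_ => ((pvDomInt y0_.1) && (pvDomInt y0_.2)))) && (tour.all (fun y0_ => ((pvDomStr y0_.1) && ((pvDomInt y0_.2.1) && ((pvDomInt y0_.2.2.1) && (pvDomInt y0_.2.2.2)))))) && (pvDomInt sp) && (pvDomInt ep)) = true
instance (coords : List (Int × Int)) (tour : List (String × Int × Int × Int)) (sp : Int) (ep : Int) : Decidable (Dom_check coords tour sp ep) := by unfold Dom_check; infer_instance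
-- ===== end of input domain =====

-- B replaces A's single fused stateful loop (flags + early return) with one any-scan for
-- interior crossings plus four independent any-scans for the side flags (objective: simpler).

-- ===== PORT A =====
-- A's for-loop over the tour with its four mutable flags, as structural recursion carrying
-- the flags; 'return False' becomes returning false without recursing.
def checkLoop (N S W E : Int) (tour : List (String × Int × Int × Int)) (ht hb vl vr : Bool) : Bool :=
  match tour with
  | [] => ht && hb && vl && vr
  | (d, a, b, c) :: rest =>
    if d == "UP" then
      let vl' := if c ≤ W then true else vl
      let vr' := if E ≤ c then true else vr
      if S ≤ a ∧ b < S ∧ W + 1 ≤ c ∧ c < E then false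
      else checkLoop N S W E rest ht hb vl' vr'
    else if d == "DOWN" then
      let vl' := if c ≤ W then true else vl
      let vr' := if E ≤ c then true else vr
      if a ≤ N ∧ N < b ∧ W + 1 ≤ c ∧ c < E then false
      else checkLoop N S W E rest ht hb vl' vr'
    else if d == "LEFT" then
      let ht' := if c ≤ N then true else ht
      let hb' := if S ≤ c then true else hb
      if E ≤ a ∧ b < E ∧ N + 1 ≤ c ∧ c < S then false
      else checkLoop N S W E rest ht' hb' vl vr
    else if d == "RIGHT" then
      let ht' := if c ≤ N then true else ht
      let hb' := if S ≤ c then true else hb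
      if a ≤ W ∧ W < b ∧ N + 1 ≤ c ∧ c < S then false
      else checkLoop N S W E rest ht' hb' vl vr
    else checkLoop N S W E rest ht hb vl vr

def check (coords : List (Int × Int)) (tour : List (String × Int × Int × Int)) (sp : Int) (ep : Int) : Bool :=
  match PySem.List.pyGet? coords sp, PySem.List.pyGet? coords ep with
  | some (sr, sc), some (er, ec) =>
    -- N, S = sorted((start_row, end_row)); W, E = sorted((start_col, end_col))
    checkLoop (min sr er) (max sr er) (min sc ec) (max sc ec) tour false false false false
  | _, _ => false    -- IndexError in Python; excluded by Pre_check

-- ===== PORT B =====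
def crossesB (N S W E : Int) (e : String × Int × Int × Int) : Bool :=
  if e.1 == "UP" then decide (S ≤ e.2.1 ∧ e.2.2.1 < S ∧ W < e.2.2.2 ∧ e.2.2.2 < E)
  else if e.1 == "DOWN" then decide (e.2.1 ≤ N ∧ N < e.2.2.1 ∧ W < e.2.2.2 ∧ e.2.2.2 < E)
  else if e.1 == "LEFT" then decide (E ≤ e.2.1 ∧ e.2.2.1 < E ∧ N < e.2.2.2 ∧ e.2.2.2 < S)
  else if e.1 == "RIGHT" then decide (e.2.1 ≤ W ∧ W < e.2.2.1 ∧ N < e.2.2.2 ∧ e.2.2.2 < S)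
  else false

def isHoriz (e : String × Int × Int × Int) : Bool := e.1 == "LEFT" || e.1 == "RIGHT"
def isVert (e : String × Int × Int × Int) : Bool := e.1 == "UP" || e.1 == "DOWN"

def check_alt (coords : List (Int × Int)) (tour : List (String × Int × Int × Int)) (sp : Int) (ep : Int) : Bool :=
  match PySem.List.pyGet? coords sp with
  | none => false
  | some (sr, sc) =>
    match PySem.List.pyGet? coords ep with
    | none => false
    | some (er, ec) =>
      let N := min sr er; let S := max sr er
      let W := min sc ec; let E := max sc ec
      if tour.any (crossesB N S W E) then false
      else
        tour.any (fun e => isHoriz e && decide (e.2.2.2 ≤ N)) &&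
        tour.any (fun e => isHoriz e && decide (S ≤ e.2.2.2)) &&
        tour.any (fun e => isVert e && decide (e.2.2.2 ≤ W)) &&
        tour.any (fun e => isVert e && decide (E ≤ e.2.2.2))

-- ===== PRECONDITION & SPEC =====
-- Pre_check excludes exactly the inputs where Python's coords[sp] / coords[ep] raises IndexError.
def Pre_check (coords : List (Int × Int)) (tour : List (String × Int × Int × Int)) (sp : Int) (ep : Int) : Prop :=
  PySem.Raise.InRange coords.length sp ∧ PySem.Raise.InRange coords.length ep
instance (coords : List (Int × Int)) (tour : List (String × Int × Int × Int)) (sp : Int) (ep : Int) : Decidable (Pre_check coords tour sp ep) := by unfold Pre_check; infer_instance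

def pvWitness_check : (List (Int × Int)) × (List (String × Int × Int × Int)) × Int × Int :=
  ([(0, 0), (2, 3)], [("UP", 2, -1, 0), ("LEFT", 5, -1, 0)], 0, 1)

def Spec_check (coords : List (Int × Int)) (tour : List (String × Int × Int × Int)) (sp : Int) (ep : Int) (out : Bool) : Prop := out = check_alt coords tour sp ep
instance (coords : List (Int × Int)) (tour : List (String × Int × Int × Int)) (sp : Int) (ep : Int) (out : Bool) : Decidable (Spec_check coords tour sp ep out) := by unfold Spec_check; infer_instance

-- ===== CLAIM (what is proved, stated in full; the proofs are below) =====
def Claim_equal_check : Prop := ∀ (coords : List (Int × Int)) (tour : List (String × Int × Int × Int)) (sp : Int) (ep : Int), Dom_check coords tour sp ep → Pre_check coords tour sp ep → Spec_check coords tour sp ep (check coords tour sp ep)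

-- ===== LEMMAS AND PROOFS =====

-- A's loop equals: no interior crossing, and each flag is its initial value OR-ed with its scan.
theorem checkLoop_eq (N S W E : Int) (t : List (String × Int × Int × Int))
    (ht hb vl vr : Bool) :
    checkLoop N S W E t ht hb vl vr =
      (!(t.any (crossesB N S W E)) &&
        ((ht || t.any (fun e => isHoriz e && decide (e.2.2.2 ≤ N))) &&
         ((hb || t.any (fun e => isHoriz e && decide (S ≤ e.2.2.2))) &&
          ((vl || t.any (fun e => isVert e && decide (e.2.2.2 ≤ W))) &&
           (vr || t.any (fun e => isVert e && decide (E ≤ e.2.2.2))))))) := by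
  induction t generalizing ht hb vl vr with
  | nil => simp [checkLoop, Bool.and_assoc]
  | cons e rest ih =>
    obtain ⟨d, a, b, c⟩ := e
    by_cases hU : d = "UP"
    · subst hU
      by_cases hc : S ≤ a ∧ b < S ∧ W + 1 ≤ c ∧ c < E
      · have hT : crossesB N S W E ("UP", a, b, c) = true := by
          simp [crossesB]
          omega
        simp [checkLoop, hc, hT]
      · have hF : crossesB N S W E ("UP", a, b, c) = false := by
          simp [crossesB]
          omega
        simp only [checkLoop, if_neg hc, List.any_cons, hF, Bool.false_or,
          BEq.rfl, if_true]
        simp only [ih]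
        simp [isHoriz, isVert, Bool.or_comm, Bool.or_assoc]
    · by_cases hD : d = "DOWN"
      · subst hD
        by_cases hc : a ≤ N ∧ N < b ∧ W + 1 ≤ c ∧ c < E
        · have hT : crossesB N S W E ("DOWN", a, b, c) = true := by
            simp [crossesB]
            omega
          simp [checkLoop, hc, hT]
        · have hF : crossesB N S W E ("DOWN", a, b, c) = false := by
            simp [crossesB]
            omega
          simp only [checkLoop, if_neg hc, List.any_cons, hF, Bool.false_or,
            BEq.rfl, if_true]
          simp only [ih]
          simp [isHoriz, isVert, Bool.or_comm, Bool.or_assoc]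
      · by_cases hL : d = "LEFT"
        · subst hL
          by_cases hc : E ≤ a ∧ b < E ∧ N + 1 ≤ c ∧ c < S
          · have hT : crossesB N S W E ("LEFT", a, b, c) = true := by
              simp [crossesB]
              omega
            simp [checkLoop, hc, hT]
          · have hF : crossesB N S W E ("LEFT", a, b, c) = false := by
              simp [crossesB]
              omega
            simp only [checkLoop, if_neg hc, List.any_cons, hF, Bool.false_or,
              BEq.rfl, if_true]
            simp only [ih]
            simp [isHoriz, isVert, Bool.or_comm, Bool.or_assoc]
        · by_cases hR : d = "RIGHT"
          · subst hR
            by_cases hc : a ≤ W ∧ W < b ∧ N + 1 ≤ c ∧ c < S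
            · have hT : crossesB N S W E ("RIGHT", a, b, c) = true := by
                simp [crossesB]
                omega
              simp [checkLoop, hc, hT]
            · have hF : crossesB N S W E ("RIGHT", a, b, c) = false := by
                simp [crossesB]
                omega
              simp only [checkLoop, if_neg hc, List.any_cons, hF, Bool.false_or,
                BEq.rfl, if_true]
              simp only [ih]
              simp [isHoriz, isVert, Bool.or_comm, Bool.or_assoc]
          · have hF : crossesB N S W E (d, a, b, c) = false := by
              simp [crossesB, hU, hD, hL, hR]
            simp only [checkLoop, List.any_cons, hF, Bool.false_or]
            have e1 : (d == "UP") = false := beq_eq_false_iff_ne.mpr hU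
            have e2 : (d == "DOWN") = false := beq_eq_false_iff_ne.mpr hD
            have e3 : (d == "LEFT") = false := beq_eq_false_iff_ne.mpr hL
            have e4 : (d == "RIGHT") = false := beq_eq_false_iff_ne.mpr hR
            rw [if_neg (by simp [e1]), if_neg (by simp [e2]),
              if_neg (by simp [e3]), if_neg (by simp [e4])]
            simp only [ih]
            simp [isHoriz, isVert, e1, e2, e3, e4]

theorem check_spec : Claim_equal_check := by
  intro coords tour sp ep _ hpre
  obtain ⟨h1, h2⟩ := hpre
  obtain ⟨p, hp⟩ := Option.isSome_iff_exists.mp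
    (by simpa [PySem.List.pyGet?_eq_none_iff, Option.isSome_iff_ne_none] using h1 :
      (PySem.List.pyGet? coords sp).isSome)
  obtain ⟨q, hq⟩ := Option.isSome_iff_exists.mp
    (by simpa [PySem.List.pyGet?_eq_none_iff, Option.isSome_iff_ne_none] using h2 :
      (PySem.List.pyGet? coords ep).isSome)
  obtain ⟨sr, sc⟩ := p
  obtain ⟨er, ec⟩ := q
  unfold Spec_check check check_alt
  rw [hp, hq]
  simp only [checkLoop_eq, Bool.false_or]
  cases h : tour.any (crossesB (min sr er) (max sr er) (min sc ec) (max sc ec)) <;>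
    simp [h, Bool.and_assoc]
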